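-- pv_equiv track=rewrite | github.com/Adamhat/OSUSpring2023 | cs325/HW5/solutions/mis.py | solutionc
-- ===== SOURCE A (Python) =====
-- def solutionc(a, back): # non-recursive backtracing (Otso Barron's style); fastest
--     sol = []
--     i = len(a)-1
--     while i >= 0: # for-loop doesn't work
--         if not back[i]:
--             sol.append(a[i])
--             i -= 1
--         i -= 1
--     return sol[::-1] # reverse the order!
-- ===== SOURCE B (Python) =====
-- def solutionc(a, back):
--     # Forward bottom-up dynamic programming: prev1 / prev2 are the solutions of
--     # the backtracking walk started at index i-1 / i-2, kept as shared linked
--     # chains (cons cells, newest element first) so each step is O(1):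
--     #   R[i] = R[i-1]          if back[i]
--     #   R[i] = (a[i], R[i-2])  otherwise
--     # A final unwind of the chain gives R[len(a)-1] in forward order.
--     prev2 = prev1 = None
--     for x, b in zip(a, back):
--         prev2, prev1 = prev1, (prev1 if b else (x, prev2))
--     out = []
--     while prev1 is not None:
--         out.append(prev1[0])
--         prev1 = prev1[1]
--     return out[::-1]
-- ===== Notes on version B (the rewrite author's own statement) =====
-- stated objective: alternative
-- what changed: Replaced the backward index-walk with append-and-final-reverse by a forward bottom-up dynamic program: one pass over zip(a, back) maintaining two rolling partial solutions as shared cons-cell chains (answers for start index i-1 and i-2), unwound into the result at the end.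
import Mathlib
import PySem

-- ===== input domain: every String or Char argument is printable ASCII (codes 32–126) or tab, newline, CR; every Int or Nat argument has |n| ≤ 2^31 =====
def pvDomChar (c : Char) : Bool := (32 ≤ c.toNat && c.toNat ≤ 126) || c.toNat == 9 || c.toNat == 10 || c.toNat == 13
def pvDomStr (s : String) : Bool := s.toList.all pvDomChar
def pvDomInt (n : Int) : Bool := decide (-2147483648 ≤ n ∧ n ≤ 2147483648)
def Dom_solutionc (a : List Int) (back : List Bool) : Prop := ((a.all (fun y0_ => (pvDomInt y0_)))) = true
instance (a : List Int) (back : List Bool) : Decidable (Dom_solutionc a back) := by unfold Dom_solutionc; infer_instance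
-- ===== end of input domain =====

-- B replaces A's backward index walk (append + final [::-1]) by a forward bottom-up
-- dynamic program over zip(a, back) with two rolling partial solutions (objective: alternative).


-- ===== PORT A =====
-- A's while-loop: sol accumulator, index i walks down by 1 or 2.
-- back[i] / a[i] are in range on Pre_ (a.length ≤ back.length), so pyGetD is exact there.
def solutioncLoop (a : List Int) (back : List Bool) (sol : List Int) (i : Int) : List Int :=
  if _h : 0 ≤ i then
    if PySem.List.pyGetD back i false = false then
      solutioncLoop a back (sol ++ [PySem.List.pyGetD a i 0]) (i - 2)
    else
      solutioncLoop a back sol (i - 1)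
  else sol
termination_by (i + 1).toNat
decreasing_by all_goals omega

def solutionc (a : List Int) (back : List Bool) : List Int :=
  (solutioncLoop a back [] ((a.length : Int) - 1)).reverse  -- sol[::-1]

-- ===== PORT B =====
-- the DP step: (prev2, prev1) ↦ (prev1, prev1 if b else (x, prev2)), folded over zip(a, back);
-- Source B's cons-cell chains (newest element first, None = empty) are Lean lists, (x, prev2) is x :: prev2
def solutioncStep (s : List Int × List Int) (p : Int × Bool) : List Int × List Int :=
  (s.2, if p.2 then s.2 else p.1 :: s.1)

def solutionc_alt (a : List Int) (back : List Bool) : List Int :=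
  -- Source B's final unwind loop emits the chain newest-first and then applies [::-1]: a reverse
  (((a.zip back).foldl solutioncStep ([], [])).2).reverse

-- ===== PRECONDITION & SPEC =====
-- Pre_ excludes exactly the inputs on which Python A raises IndexError: back shorter than a
-- (the walk always reads back[len(a)-1] first).
def Pre_solutionc (a : List Int) (back : List Bool) : Prop := a.length ≤ back.length
instance (a : List Int) (back : List Bool) : Decidable (Pre_solutionc a back) := by unfold Pre_solutionc; infer_instance
def pvWitness_solutionc : List Int × List Bool := ([1, 2, 3], [false, true, false])

def Spec_solutionc (a : List Int) (back : List Bool) (out : List Int) : Prop := out = solutionc_alt a back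
instance (a : List Int) (back : List Bool) (out : List Int) : Decidable (Spec_solutionc a back out) := by unfold Spec_solutionc; infer_instance

-- ===== CLAIM (what is proved, stated in full; the proofs are below) =====
def Claim_equal_solutionc : Prop := ∀ (a : List Int) (back : List Bool), Dom_solutionc a back → Pre_solutionc a back → Spec_solutionc a back (solutionc a back)

-- ===== LEMMAS AND PROOFS =====
-- proof-side bridge: the elements selected by the walk starting at i, in forward order
def bridgeRec (a : List Int) (back : List Bool) (i : Int) : List Int :=
  if _h : 0 ≤ i then
    if PySem.List.pyGetD back i false = false then
      bridgeRec a back (i - 2) ++ [PySem.List.pyGetD a i 0]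
    else
      bridgeRec a back (i - 1)
  else []
termination_by (i + 1).toNat
decreasing_by all_goals omega

lemma solutioncLoop_eq_bridge (a : List Int) (back : List Bool) :
    ∀ (n : Nat) (i : Int), (i + 1).toNat = n → ∀ (sol : List Int),
      solutioncLoop a back sol i = sol ++ (bridgeRec a back i).reverse := by
  intro n
  induction n using Nat.strong_induction_on with
  | _ n ih =>
    intro i hn sol
    rw [solutioncLoop, bridgeRec]
    split
    · split
      · rw [ih ((i - 2) + 1).toNat (by omega) (i - 2) rfl]
        simp
      · rw [ih ((i - 1) + 1).toNat (by omega) (i - 1) rfl]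
    · simp

lemma bridgeRec_neg (a : List Int) (back : List Bool) (i : Int) (h : i < 0) :
    bridgeRec a back i = [] := by
  rw [bridgeRec, dif_neg (by omega)]

-- the fold over the first k pairs of zip(a, back) carries (R[k-2], R[k-1])
lemma foldB (a : List Int) (back : List Bool) (h : a.length ≤ back.length) :
    ∀ k, k ≤ a.length →
      ((a.zip back).take k).foldl solutioncStep ([], []) =
        ((bridgeRec a back ((k : Int) - 2)).reverse, (bridgeRec a back ((k : Int) - 1)).reverse) := by
  intro k
  induction k with
  | zero =>
    intro _
    have h2 : ((0 : Nat) : Int) - 2 = -2 := by norm_num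
    have h1 : ((0 : Nat) : Int) - 1 = -1 := by norm_num
    rw [h2, h1, bridgeRec_neg a back (-2) (by norm_num),
      bridgeRec_neg a back (-1) (by norm_num)]
    simp
  | succ k ih =>
    intro hk
    have hka : k < a.length := by omega
    have hkb : k < back.length := by omega
    have hz : k < (a.zip back).length := by simp; omega
    rw [List.take_add_one, List.getElem?_eq_getElem hz, List.foldl_append,
      ih (by omega)]
    simp only [Option.toList, List.foldl_cons, List.foldl_nil]
    have hget : (a.zip back)[k] = (a[k], back[k]) := List.getElem_zip
    rw [hget]
    have h1 : ((k : Int) + 1 - 2) = (k : Int) - 1 := by omega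
    have h2 : ((k : Int) + 1 - 1) = (k : Int) := by omega
    have hb : PySem.List.pyGetD back (k : Int) false = back[k] :=
      PySem.List.pyGetD_eq_getElem back false (by omega) (by exact_mod_cast hkb)
    have ha : PySem.List.pyGetD a (k : Int) 0 = a[k] :=
      PySem.List.pyGetD_eq_getElem a 0 (by omega) (by exact_mod_cast hka)
    have hbr : bridgeRec a back (k : Int) =
        if back[k] then bridgeRec a back ((k : Int) - 1)
        else bridgeRec a back ((k : Int) - 2) ++ [a[k]] := by
      rw [bridgeRec, dif_pos (by omega), hb, ha]
      cases back[k] <;> simp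
    rw [Int.natCast_succ, h1, h2, hbr]
    cases back[k] <;> simp [solutioncStep]

-- ===== VERDICT (by name: the statement is the Claim_ definition above) =====
theorem solutionc_spec : Claim_equal_solutionc := by
  intro a back _ hpre
  unfold Spec_solutionc solutionc solutionc_alt
  rw [solutioncLoop_eq_bridge a back ((((a.length : Int) - 1) + 1).toNat) _ rfl]
  have hz : a.zip back = (a.zip back).take a.length := by
    rw [List.take_of_length_le (by simp)]
  rw [hz, foldB a back hpre a.length le_rfl]
  simp
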